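-- pv_equiv track=rewrite | github.com/dkasak/mario | mario/core.py | get_var_references
-- ===== SOURCE A (Python) =====
-- def get_var_references(s):
--     start = 0
--     while True:
--         p1 = s.find("{", start)
--         p2 = s.find("}", p1+1)
--         if p1 != -1 and p2 != -1:
--             start = p2+1
--             yield s[p1:p2+1]
--         else:
--             return
-- ===== SOURCE B (Python) =====
-- def get_var_references(s):
--     # single pass over the characters with an explicit open-brace buffer
--     buf = None
--     for ch in s:
--         if buf is None:
--             if ch == '{':
--                 buf = ['{']
--         else:
--             buf.append(ch)
--             if ch == '}':
--                 yield ''.join(buf)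
--                 buf = None
-- ===== Notes on version B (the rewrite author's own statement) =====
-- stated objective: alternative
-- what changed: Replaced the repeated str.find scans with a single left-to-right pass state machine that buffers characters after an unmatched opening brace and emits the buffer at the first closing brace.
import Mathlib
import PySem

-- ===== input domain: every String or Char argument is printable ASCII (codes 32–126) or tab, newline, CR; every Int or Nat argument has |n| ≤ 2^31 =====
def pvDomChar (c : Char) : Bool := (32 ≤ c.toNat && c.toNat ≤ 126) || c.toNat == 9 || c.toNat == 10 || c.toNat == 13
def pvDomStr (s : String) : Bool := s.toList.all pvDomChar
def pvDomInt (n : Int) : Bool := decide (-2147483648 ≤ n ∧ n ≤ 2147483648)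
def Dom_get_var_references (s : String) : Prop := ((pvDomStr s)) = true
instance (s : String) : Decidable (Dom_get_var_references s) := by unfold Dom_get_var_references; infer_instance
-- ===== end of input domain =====

-- B replaces A's repeated `str.find` scans by one left-to-right pass with an explicit buffer (alternative single-pass state machine).

-- ===== PORT A =====
-- literal port of A's while-loop over `start` (fuel bounds the loop; it is proved sufficient below)
def pvGoA (c : List Char) (fuel : Nat) (start : Int) : List String :=
  match fuel with
  | 0 => []
  | fuel' + 1 =>
    let p1 := PySem.Chars.findFrom c ['{'] start
    let p2 := PySem.Chars.findFrom c ['}'] (p1 + 1)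
    if p1 ≠ -1 ∧ p2 ≠ -1 then
      String.ofList (PySem.Chars.slice c (some p1) (some (p2 + 1))) :: pvGoA c fuel' (p2 + 1)
    else []

def get_var_references (s : String) : List String :=
  pvGoA s.toList (s.toList.length + 1) 0

-- ===== PORT B =====
-- literal port of B's one-pass state machine: `none` = outside braces, `some buf` = collecting since '{'
def pvGoB (c : List Char) (buf : Option (List Char)) : List String :=
  match c, buf with
  | [], _ => []
  | ch :: rest, none => if ch = '{' then pvGoB rest (some ['{']) else pvGoB rest none
  | ch :: rest, some b =>
    let b' := b ++ [ch]
    if ch = '}' then String.ofList b' :: pvGoB rest none else pvGoB rest (some b')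

def get_var_references_alt (s : String) : List String :=
  pvGoB s.toList none

-- ===== PRECONDITION & SPEC =====
def Spec_get_var_references (s : String) (out : List String) : Prop := out = get_var_references_alt s
instance (s : String) (out : List String) : Decidable (Spec_get_var_references s out) := by unfold Spec_get_var_references; infer_instance

-- ===== CLAIM (what is proved, stated in full; the proofs are below) =====
def Claim_equal_get_var_references : Prop := ∀ (s : String), Dom_get_var_references s → Spec_get_var_references s (get_var_references s)

-- ===== LEMMAS AND PROOFS =====

-- B's machine emits nothing when no '{' remains and the buffer is closed
theorem pvGoB_no_open (t : List Char) (h : '{' ∉ t) : pvGoB t none = [] := by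
  induction t with
  | nil => rfl
  | cons a t ih =>
    simp only [List.mem_cons, not_or] at h
    have ha : a ≠ '{' := Ne.symm h.1
    simp [pvGoB, ha, ih h.2]

-- B's machine emits nothing when the open buffer is never closed
theorem pvGoB_no_close (t : List Char) (b : List Char) (h : '}' ∉ t) :
    pvGoB t (some b) = [] := by
  induction t generalizing b with
  | nil => rfl
  | cons a t ih =>
    simp only [List.mem_cons, not_or] at h
    have ha : a ≠ '}' := Ne.symm h.1
    simp [pvGoB, ha, ih _ h.2]

-- skipping up to the first '{'
theorem pvGoB_skip (n : Nat) (t u : List Char) (hn : '{' ∉ t.take n)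
    (hd : t.drop n = '{' :: u) : pvGoB t none = pvGoB u (some ['{']) := by
  induction n generalizing t with
  | zero => simp at hd; simp [hd, pvGoB]
  | succ n ih =>
    cases t with
    | nil => simp at hd
    | cons a t =>
      simp only [List.take_succ_cons, List.mem_cons, not_or] at hn
      simp only [List.drop_succ_cons] at hd
      have ha : a ≠ '{' := Ne.symm hn.1
      have : pvGoB (a :: t) none = pvGoB t none := by simp [pvGoB, ha]
      rw [this, ih t hn.2 hd]

-- consuming up to the first '}': one yield
theorem pvGoB_emit (j : Nat) (u r : List Char) (b : List Char) (hj : '}' ∉ u.take j)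
    (hd : u.drop j = '}' :: r) :
    pvGoB u (some b) = String.ofList (b ++ u.take j ++ ['}']) :: pvGoB r none := by
  induction j generalizing u b with
  | zero => simp at hd; simp [hd, pvGoB]
  | succ j ih =>
    cases u with
    | nil => simp at hd
    | cons a u =>
      simp only [List.take_succ_cons, List.mem_cons, not_or] at hj
      simp only [List.drop_succ_cons] at hd
      have ha : a ≠ '}' := Ne.symm hj.1
      have := ih u (b ++ [a]) hj.2 hd
      simp only [pvGoB, if_neg ha, this]
      simp

-- first occurrence, extracted from PySem's find_spec for a one-char needle
theorem pv_find_single (t : List Char) (a : Char) (h : PySem.Chars.find t [a] ≠ -1) :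
    ∃ n : Nat, PySem.Chars.find t [a] = (n : Int) ∧ n < t.length ∧
      t.drop n = a :: t.drop (n + 1) ∧ a ∉ t.take n := by
  have hnn : 0 ≤ PySem.Chars.find t [a] := by
    have := PySem.Chars.neg_one_le_find t [a]; omega
  obtain ⟨hpre, hmin⟩ := PySem.Chars.find_spec (s := t) (sub := [a]) hnn
  set n := (PySem.Chars.find t [a]).toNat with hn
  have hlen : n < t.length := by
    by_contra hc
    push Not at hc
    rw [List.drop_eq_nil_of_le hc] at hpre
    simp at hpre
  obtain ⟨l, hl⟩ := hpre
  rw [List.drop_eq_getElem_cons hlen] at hl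
  simp only [List.cons_append, List.nil_append, List.cons.injEq] at hl
  refine ⟨n, by omega, hlen, ?_, ?_⟩
  · rw [List.drop_eq_getElem_cons hlen, hl.1]
  · intro hmem
    obtain ⟨i, hi, hgi⟩ := List.getElem_of_mem hmem
    simp only [List.length_take, lt_min_iff] at hi
    have hi2 := hi.2
    apply hmin i hi.1
    rw [List.drop_eq_getElem_cons hi2]
    rw [List.getElem_take] at hgi
    exact ⟨List.drop (i + 1) t, by rw [hgi]; rfl⟩

-- main simulation: A's loop from position k equals B's machine on the remaining suffix
theorem pv_main (m : Nat) : ∀ (t : List Char), t.length = m →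
    ∀ (fuel k : Nat) (c : List Char),
    c.drop k = t → k ≤ c.length → t.length + 1 ≤ fuel →
    pvGoA c fuel (k : Int) = pvGoB t none := by
  induction m using Nat.strong_induction_on with
  | _ m ih =>
    intro t htm fuel k c hdrop hk hfuel
    cases fuel with
    | zero => omega
    | succ fuel' =>
      have hct : t.length = c.length - k := by rw [← hdrop]; simp
      rw [pvGoA]
      rw [PySem.Chars.findFrom_natCast c ['{'] k hk, hdrop]
      by_cases h1 : PySem.Chars.find t ['{'] = -1
      · have hno : '{' ∉ t := by
          have := (PySem.Chars.find_eq_neg_one_iff t ['{']).mp h1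
          rwa [List.singleton_infix_iff] at this
        simp only [h1, if_true]
        simp [pvGoB_no_open t hno]
      · obtain ⟨n, hfn, hnlt, hdn, hnmem⟩ := pv_find_single t '{' h1
        rw [if_neg h1, hfn]
        have hk1 : ((k : Int) + (n : Int) + 1) = ((k + n + 1 : Nat) : Int) := by push_cast; ring
        have hkn1 : k + n + 1 ≤ c.length := by omega
        rw [hk1, PySem.Chars.findFrom_natCast c ['}'] (k + n + 1) hkn1]
        have hu : c.drop (k + n + 1) = t.drop (n + 1) := by
          rw [← hdrop, List.drop_drop]; ring_nf
        set u := t.drop (n + 1) with hudef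
        rw [hu]
        by_cases h2 : PySem.Chars.find u ['}'] = -1
        · have hno : '}' ∉ u := by
            have := (PySem.Chars.find_eq_neg_one_iff u ['}']).mp h2
            rwa [List.singleton_infix_iff] at this
          simp only [h2, if_true]
          rw [pvGoB_skip n t u hnmem hdn, pvGoB_no_close u ['{'] hno]
          simp
        · obtain ⟨j, hfj, hjlt, hdj, hjmem⟩ := pv_find_single u '}' h2
          rw [if_neg h2, hfj]
          have hulen : u.length = t.length - (n + 1) := by rw [hudef]; simp
          -- the guard is true: both indices are nonnegative
          have hg1 : ((k : Int) + (n : Int)) ≠ -1 := by omega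
          have hg2 : (((k + n + 1 : Nat) : Int) + (j : Int)) ≠ -1 := by push_cast; omega
          rw [if_pos ⟨hg1, hg2⟩]
          -- the slice s[p1 : p2+1] = take (j+2) (drop (k+n) c)
          have hslice : PySem.Chars.slice c (some ((k : Int) + (n : Int)))
              (some (((k + n + 1 : Nat) : Int) + (j : Int) + 1))
              = (c.drop (k + n)).take (j + 2) := by
            have e1 : ((k : Int) + (n : Int)) = ((k + n : Nat) : Int) := by push_cast; ring
            have e2 : (((k + n + 1 : Nat) : Int) + (j : Int) + 1)
                = (((k + n : Nat) : Int) + ((j + 2 : Nat) : Int)) := by push_cast; ring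
            rw [e1, e2, PySem.Chars.slice_eq_listSlice, PySem.List.slice_natCast_add]
          rw [hslice]
          have hdkn : c.drop (k + n) = '{' :: u := by
            have : c.drop (k + n) = t.drop n := by rw [← hdrop, List.drop_drop]
            rw [this, hdn]
          have htake : ('{' :: u).take (j + 2) = '{' :: (u.take j ++ ['}']) := by
            have : u.take (j + 1) = u.take j ++ ['}'] := by
              rw [List.take_add_one]
              have : u[j]? = some '}' := by
                rw [List.getElem?_eq_getElem hjlt]
                have := congrArg List.head? hdj
                simpa [List.head?_drop, List.getElem?_eq_getElem hjlt] using this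
              simp [this]
            simp [List.take_succ_cons, this]
          rw [hdkn, htake]
          -- recursive step
          have hnext : ((((k + n + 1 : Nat) : Int) + (j : Int)) + 1)
              = ((k + n + j + 2 : Nat) : Int) := by push_cast; ring
          rw [hnext]
          have hr : c.drop (k + n + j + 2) = u.drop (j + 1) := by
            rw [← hu, List.drop_drop]; ring_nf
          have hrec := ih ((u.drop (j + 1)).length) (by simp; omega)
            (u.drop (j + 1)) rfl fuel' (k + n + j + 2) c hr (by omega) (by simp; omega)
          rw [hrec]
          rw [pvGoB_skip n t u hnmem hdn,
              pvGoB_emit j u (u.drop (j + 1)) ['{'] hjmem hdj]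
          simp

-- ===== VERDICT (by name: the statement is the Claim_ definition above) =====
theorem get_var_references_spec : Claim_equal_get_var_references := by
  intro s _
  unfold Spec_get_var_references get_var_references get_var_references_alt
  have := pv_main s.toList.length s.toList rfl (s.toList.length + 1) 0 s.toList
    (by simp) (by simp) (by omega)
  simpa using this
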